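-- pv_equiv track=rewrite | github.com/sufalo/Python | python_lab2/zad5.py | transposition_cipher
-- ===== SOURCE A (Python) =====
-- def transposition_cipher(text: str, key: int) -> str:
--     if key > len(text):
--         return text
--
--     text_list = list(text)
--
--     for i in range(0, len(text), key):
--         if i + key < len(text):
--             text_list[i], text_list[i + key] = text_list[i + key], text_list[i]
--
--     return ''.join(text_list)
--
-- text = "abcdefghij"
--
-- key = 3
-- ===== SOURCE B (Python) =====
-- def transposition_cipher(text: str, key: int) -> str:
--     if key > len(text):
--         return text
--     idx = list(range(0, len(text), key))
--     chars = [text[i] for i in idx]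
--     if len(chars) >= 2:
--         chars = chars[1:] + chars[:1]
--     out = list(text)
--     for j, i in enumerate(idx):
--         out[i] = chars[j]
--     return ''.join(out)
-- ===== Notes on version B (the rewrite author's own statement) =====
-- stated objective: alternative
-- what changed: A performs a chain of in-place adjacent swaps along positions 0, key, 2*key, ...; B instead gathers the characters at those positions, rotates the gathered list left by one, and scatters the rotated characters back (gather-rotate-scatter instead of a carry-over swap chain).
import Mathlib
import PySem

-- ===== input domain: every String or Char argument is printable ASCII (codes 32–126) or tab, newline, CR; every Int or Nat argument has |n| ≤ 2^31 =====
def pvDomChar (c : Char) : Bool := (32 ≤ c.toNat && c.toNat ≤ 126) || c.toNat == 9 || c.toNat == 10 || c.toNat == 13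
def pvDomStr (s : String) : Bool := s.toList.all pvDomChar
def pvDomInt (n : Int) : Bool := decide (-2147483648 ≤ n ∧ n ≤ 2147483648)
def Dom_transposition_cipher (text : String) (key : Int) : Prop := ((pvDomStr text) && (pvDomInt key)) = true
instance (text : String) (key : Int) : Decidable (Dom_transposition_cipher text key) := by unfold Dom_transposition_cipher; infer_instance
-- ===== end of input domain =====

-- B replaces A's carry-over swap chain with a gather / rotate-left-by-one / scatter over the key-spaced positions (alternative decomposition, same cost).

-- ===== PORT A =====
def transposition_cipher (text : String) (key : Int) : String :=
  if PySem.Str.len text < key then text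
  else
    String.ofList
      ((PySem.List.pyRange 0 (PySem.Str.len text) key).foldl
        (fun l i =>
          if i + key < PySem.Str.len text then
            PySem.List.pySetD (PySem.List.pySetD l i (PySem.List.pyGetD l (i + key) ' '))
              (i + key) (PySem.List.pyGetD l i ' ')
          else l)
        text.toList)

def transposition_cipher_alt (text : String) (key : Int) : String :=
  if PySem.Str.len text < key then text
  else
    let idx := PySem.List.pyRange 0 (PySem.Str.len text) key
    let chars := idx.map (fun i => PySem.List.pyGetD text.toList i ' ')
    let chars2 := if 2 ≤ chars.length then
        PySem.List.slice chars (some 1) none ++ PySem.List.slice chars none (some 1)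
      else chars
    String.ofList
      ((PySem.List.enumerate idx).foldl
        (fun l ji => PySem.List.pySetD l ji.2 (PySem.List.pyGetD chars2 ji.1 ' '))
        text.toList)


-- ===== PRECONDITION & SPEC =====
-- Pre_ excludes only key = 0, on which Python's range(0, len(text), 0) raises ValueError in A (B raises there too).
def Pre_transposition_cipher (text : String) (key : Int) : Prop := key ≠ 0
instance (text : String) (key : Int) : Decidable (Pre_transposition_cipher text key) := by
  unfold Pre_transposition_cipher; infer_instance
def pvWitness_transposition_cipher : String × Int := ("abcdefghij", 3)

def Spec_transposition_cipher (text : String) (key : Int) (out : String) : Prop := out = transposition_cipher_alt text key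
instance (text : String) (key : Int) (out : String) : Decidable (Spec_transposition_cipher text key out) := by unfold Spec_transposition_cipher; infer_instance

-- ===== CLAIM (what is proved, stated in full; the proofs are below) =====
def Claim_equal_transposition_cipher : Prop := ∀ (text : String) (key : Int), Dom_transposition_cipher text key → Pre_transposition_cipher text key → Spec_transposition_cipher text key (transposition_cipher text key)

-- ===== LEMMAS AND PROOFS =====

-- Int-indexed read-after-write for pySetD
theorem pv_getD_setD (xs : List Char) (i m : Int) (v d : Char)
    (hi0 : 0 ≤ i) (hi : i < (xs.length : Int)) (hm0 : 0 ≤ m) :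
    PySem.List.pyGetD (PySem.List.pySetD xs i v) m d
      = if m = i then v else PySem.List.pyGetD xs m d := by
  obtain ⟨ni, rfl⟩ := Int.eq_ofNat_of_zero_le hi0
  obtain ⟨nm, rfl⟩ := Int.eq_ofNat_of_zero_le hm0
  rw [PySem.List.pyGetD_pySetD_natCast xs ni nm v d (by exact_mod_cast hi)]
  simp [Nat.cast_inj]

-- cons/nil forms of pyRange
theorem pv_pyRange_pos_nil (a b s : Int) (hs : 0 < s) (hab : b ≤ a) :
    PySem.List.pyRange a b s = [] := by
  rw [PySem.List.pyRange_of_pos a b hs, if_neg (by omega)]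
  simp

theorem pv_pyRange_pos_cons (a b s : Int) (hs : 0 < s) (hab : a < b) :
    PySem.List.pyRange a b s = a :: PySem.List.pyRange (a + s) b s := by
  rw [PySem.List.pyRange_of_pos a b hs, PySem.List.pyRange_of_pos (a+s) b hs]
  rw [if_pos hab]
  have hC : ((b - a + s - 1) / s).toNat
      = (if a + s < b then ((b - (a + s) + s - 1) / s).toNat else 0) + 1 := by
    by_cases h2 : a + s < b
    · rw [if_pos h2]
      have e1 : b - a + s - 1 = (b - (a+s) + s - 1) + 1 * s := by ring
      rw [e1, Int.add_mul_ediv_right _ _ (by omega)]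
      have h0 : 0 ≤ (b - (a+s) + s - 1) / s := Int.ediv_nonneg (by omega) (by omega)
      omega
    · rw [if_neg h2]
      have e1 : (b - a + s - 1) / s = 1 := by
        rw [Int.ediv_eq_iff_of_pos (by omega : (0:Int) < s)]
        constructor <;> omega
      omega
  rw [hC, List.range_succ_eq_map]
  simp [List.map_map, Function.comp_def]
  intro k _
  ring

theorem pv_pyRange_neg_nil (a b s : Int) (hs : s < 0) (hab : a ≤ b) :
    PySem.List.pyRange a b s = [] := by
  unfold PySem.List.pyRange
  rw [if_neg (by omega)]
  simp only [if_neg (by omega : ¬ (0:Int) < s), if_neg (by omega : ¬ b < a)]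
  simp

theorem pv_foldl_len {β : Type} (f : List Char → β → List Char)
    (hf : ∀ l x, (f l x).length = l.length) :
    ∀ (ps : List β) (l : List Char), (ps.foldl f l).length = l.length := by
  intro ps
  induction ps with
  | nil => intro l; rfl
  | cons p ps ih => intro l; rw [List.foldl_cons, ih, hf]

-- pointwise characterisation of A's swap-chain fold
theorem pv_foldA (s : Int) (hs : 0 < s) (n : Int) :
    ∀ (k : Nat) (a : Int), 0 ≤ a → a < n → n - a ≤ (k : Int) →
    ∀ (l : List Char), (l.length : Int) = n → ∀ (m : Int), 0 ≤ m → m < n →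
    PySem.List.pyGetD
      ((PySem.List.pyRange a n s).foldl
        (fun l i =>
          if i + s < n then
            PySem.List.pySetD (PySem.List.pySetD l i (PySem.List.pyGetD l (i + s) ' '))
              (i + s) (PySem.List.pyGetD l i ' ')
          else l) l) m ' '
      = if a ≤ m ∧ s ∣ (m - a) then
          (if m + s < n then PySem.List.pyGetD l (m + s) ' ' else PySem.List.pyGetD l a ' ')
        else PySem.List.pyGetD l m ' ' := by
  intro k
  induction k with
  | zero => intro a ha0 han hk; omega
  | succ k ih =>
    intro a ha0 han hk l hl m hm0 hmn
    rw [pv_pyRange_pos_cons a n s hs han, List.foldl_cons]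
    by_cases h2 : a + s < n
    · rw [if_pos h2]
      set l2 := PySem.List.pySetD (PySem.List.pySetD l a (PySem.List.pyGetD l (a + s) ' '))
          (a + s) (PySem.List.pyGetD l a ' ') with hl2def
      have hl2len : (l2.length : Int) = n := by
        simp [hl2def, PySem.List.length_pySetD, hl]
      have hget : ∀ x : Int, 0 ≤ x →
          PySem.List.pyGetD l2 x ' ' =
            if x = a + s then PySem.List.pyGetD l a ' '
            else if x = a then PySem.List.pyGetD l (a + s) ' '
            else PySem.List.pyGetD l x ' ' := by
        intro x hx0
        rw [hl2def, pv_getD_setD _ _ _ _ _ (by omega) (by simp [PySem.List.length_pySetD, hl]; omega) hx0]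
        by_cases hxa : x = a + s
        · simp [hxa]
        · rw [if_neg hxa, pv_getD_setD _ _ _ _ _ ha0 (by omega) hx0, if_neg hxa]
      rw [ih (a + s) (by omega) h2 (by omega) l2 hl2len m hm0 hmn]
      have hdvd : (s ∣ m - (a + s)) ↔ (s ∣ m - a) := by
        constructor <;> intro h
        · have := dvd_add h (dvd_refl s); simpa [sub_add, sub_sub] using by
            have e : m - (a + s) + s = m - a := by ring
            rw [e] at this; exact this
        · have := dvd_sub h (dvd_refl s)
          have e : m - a - s = m - (a + s) := by ring
          rw [e] at this; exact this
      by_cases hc : a ≤ m ∧ s ∣ (m - a)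
      · rw [if_pos hc]
        by_cases hma : m = a
        · -- m = a : IH else-branch, l2[a] = l[a+s]
          subst hma
          rw [if_neg (by omega), if_pos h2]
          rw [hget m hm0, if_neg (by omega), if_pos rfl]
        · -- m ≥ a + s
          have hms : a + s ≤ m := by
            rcases hc with ⟨hle, hd⟩
            have : s ≤ m - a := Int.le_of_dvd (by omega) hd
            omega
          rw [if_pos ⟨hms, hdvd.mpr hc.2⟩]
          by_cases hmsn : m + s < n
          · rw [if_pos hmsn, if_pos hmsn, hget (m + s) (by omega),
              if_neg (by omega), if_neg (by omega)]
          · rw [if_neg hmsn, if_neg hmsn, hget (a + s) (by omega), if_pos rfl]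
      · rw [if_neg hc]
        have hnc2 : ¬ (a + s ≤ m ∧ s ∣ m - (a + s)) := by
          intro ⟨h1, h2'⟩; exact hc ⟨by omega, hdvd.mp h2'⟩
        rw [if_neg hnc2, hget m hm0, if_neg (by rintro rfl; exact hc ⟨by omega, by simp⟩),
          if_neg (by rintro rfl; exact hc ⟨le_refl _, by simp⟩)]
    · -- a + s ≥ n : range is [a], step does nothing
      rw [if_neg h2, pv_pyRange_pos_nil (a + s) n s hs (by omega), List.foldl_nil]
      by_cases hc : a ≤ m ∧ s ∣ (m - a)
      · have hma : m = a := by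
          by_contra hne
          have : s ≤ m - a := Int.le_of_dvd (by omega) hc.2
          omega
        rw [if_pos hc, if_neg (by omega), hma]
      · rw [if_neg hc]

-- pointwise characterisation of B's scatter fold
theorem pv_foldB (s : Int) (hs : 0 < s) (n : Int) (cs : List Char) :
    ∀ (k : Nat) (a c : Int), 0 ≤ a → a < n → n - a ≤ (k : Int) →
    ∀ (l : List Char), (l.length : Int) = n → ∀ (m : Int), 0 ≤ m → m < n →
    PySem.List.pyGetD
      ((PySem.List.enumerate (PySem.List.pyRange a n s) c).foldl
        (fun l ji => PySem.List.pySetD l ji.2 (PySem.List.pyGetD cs ji.1 ' ')) l) m ' '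
      = if a ≤ m ∧ s ∣ (m - a) then PySem.List.pyGetD cs (c + (m - a) / s) ' '
        else PySem.List.pyGetD l m ' ' := by
  intro k
  induction k with
  | zero => intro a c ha0 han hk; omega
  | succ k ih =>
    intro a c ha0 han hk l hl m hm0 hmn
    rw [pv_pyRange_pos_cons a n s hs han, PySem.List.enumerate_cons, List.foldl_cons]
    set l2 := PySem.List.pySetD l a (PySem.List.pyGetD cs c ' ') with hl2def
    have hl2len : (l2.length : Int) = n := by
      simp [hl2def, PySem.List.length_pySetD, hl]
    have hget : ∀ x : Int, 0 ≤ x →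
        PySem.List.pyGetD l2 x ' ' =
          if x = a then PySem.List.pyGetD cs c ' ' else PySem.List.pyGetD l x ' ' := by
      intro x hx0
      rw [hl2def, pv_getD_setD _ _ _ _ _ ha0 (by omega) hx0]
    by_cases h2 : a + s < n
    · rw [ih (a + s) (c + 1) (by omega) h2 (by omega) l2 hl2len m hm0 hmn]
      have hdvd : (s ∣ m - (a + s)) ↔ (s ∣ m - a) := by
        constructor <;> intro h
        · have h' := dvd_add h (dvd_refl s)
          have e : m - (a + s) + s = m - a := by ring
          rw [e] at h'; exact h'
        · have h' := dvd_sub h (dvd_refl s)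
          have e : m - a - s = m - (a + s) := by ring
          rw [e] at h'; exact h'
      by_cases hc : a ≤ m ∧ s ∣ (m - a)
      · rw [if_pos hc]
        by_cases hma : m = a
        · subst hma
          rw [if_neg (by omega), hget m hm0, if_pos rfl]
          simp
        · have hms : a + s ≤ m := by
            have : s ≤ m - a := Int.le_of_dvd (by omega) hc.2
            omega
          rw [if_pos ⟨hms, hdvd.mpr hc.2⟩]
          have hq : c + 1 + (m - (a + s)) / s = c + (m - a) / s := by
            have e : m - a = (m - (a + s)) + 1 * s := by ring
            rw [e, Int.add_mul_ediv_right _ _ (by omega)]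
            ring
          rw [hq]
      · rw [if_neg hc]
        have hnc2 : ¬ (a + s ≤ m ∧ s ∣ m - (a + s)) := by
          intro ⟨h1, h2'⟩; exact hc ⟨by omega, hdvd.mp h2'⟩
        rw [if_neg hnc2, hget m hm0, if_neg (by rintro rfl; exact hc ⟨le_refl _, by simp⟩)]
    · rw [pv_pyRange_pos_nil (a + s) n s hs (by omega)]
      rw [PySem.List.enumerate_nil, List.foldl_nil]
      by_cases hc : a ≤ m ∧ s ∣ (m - a)
      · have hma : m = a := by
          by_contra hne
          have : s ≤ m - a := Int.le_of_dvd (by omega) hc.2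
          omega
        subst hma
        rw [if_pos hc, hget m hm0, if_pos rfl]
        simp
      · rw [if_neg hc, hget m hm0, if_neg (by rintro rfl; exact hc ⟨le_refl _, by simp⟩)]

theorem pv_main : ∀ (text : String) (key : Int), key ≠ 0 →
    transposition_cipher text key = transposition_cipher_alt text key := by
  intro text key hpre
  unfold transposition_cipher transposition_cipher_alt
  by_cases hbig : PySem.Str.len text < key
  · rw [if_pos hbig, if_pos hbig]
  · rw [if_neg hbig, if_neg hbig]
    rw [PySem.Str.len_eq] at *
    set l0 := text.toList with hl0
    set N := l0.length with hN
    by_cases hneg : key < 0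
    · rw [pv_pyRange_neg_nil 0 (↑N) key hneg (by positivity)]
      simp [PySem.List.enumerate_nil]
    · have hs : 0 < key := by omega
      have hkey : key ≤ (N : Int) := by omega
      have hN1 : 0 < (N : Int) := by omega
      -- the two folded lists
      congr 1
      apply List.ext_getElem
      · rw [pv_foldl_len _ (by
            intro l x
            split <;> simp [PySem.List.length_pySetD]),
          pv_foldl_len _ (by intro l x; simp [PySem.List.length_pySetD])]
      · intro u hu1 hu2
        have huN : u < N := by
          have := hu1
          rwa [pv_foldl_len _ (by intro l x; split <;> simp [PySem.List.length_pySetD])] at this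
        have e1 : ∀ (xs : List Char) (h : u < xs.length), xs[u]'h = PySem.List.pyGetD xs (↑u) ' ' := by
          intro xs h
          rw [PySem.List.pyGetD_natCast, List.getD_eq_getElem]
        rw [e1 _ hu1, e1 _ hu2]
        rw [pv_foldA key hs (↑N) N 0 le_rfl hN1 (by omega) l0 rfl (↑u) (by positivity) (by exact_mod_cast huN)]
        rw [pv_foldB key hs (↑N) _ N 0 0 le_rfl hN1 (by omega) l0 rfl (↑u) (by positivity) (by exact_mod_cast huN)]
        set chars := (PySem.List.pyRange 0 (↑N) key).map (fun i => PySem.List.pyGetD l0 i ' ') with hchars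
        set C := (((N : Int) - 0 + key - 1) / key).toNat with hC
        have hidx : PySem.List.pyRange 0 (↑N) key = (List.range C).map (fun k : Nat => 0 + key * (k : Int)) := by
          rw [PySem.List.pyRange_of_pos 0 (↑N) hs, if_pos hN1]
        have hlen : chars.length = C := by rw [hchars, hidx]; simp
        have ft : ∀ t : Nat, (t < C ↔ key * (t : Int) < (N : Int)) := by
          intro t
          have h1 := Int.le_ediv_iff_mul_le (a := (t : Int) + 1) (b := (N : Int) - 0 + key - 1) hs
          have h2 : ((t : Int) + 1) * key = key * (t : Int) + key := by ring
          rw [h2] at h1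
  
          rw [hC]
          generalize key * (t : Int) = M at h1 ⊢
          generalize hD : ((N : Int) - 0 + key - 1) / key = D at h1 ⊢
          constructor
          · intro h
            have := h1.mp (by omega)
            omega
          · intro h
            have := h1.mpr (by omega)
            omega
        have hcharget : ∀ t : Nat, t < C → PySem.List.pyGetD chars (↑t) ' ' = PySem.List.pyGetD l0 (key * (t : Int)) ' ' := by
          intro t ht
          rw [hchars, hidx, List.map_map, PySem.List.pyGetD_natCast,
            List.getD_eq_getElem _ _ (by simpa using ht), List.getElem_map, List.getElem_range]
          simp
        simp only [sub_zero, zero_add, Nat.cast_nonneg, true_and]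
        by_cases hchain : key ∣ (u : Int)
        · rw [if_pos hchain, if_pos hchain]
          obtain ⟨c, hc⟩ := hchain
          have hc0 : 0 ≤ c := by nlinarith [Nat.cast_nonneg (α := Int) u]
          obtain ⟨t, rfl⟩ := Int.eq_ofNat_of_zero_le hc0
          have hdiv : (u : Int) / key = (t : Int) := by
            rw [hc, Int.mul_ediv_cancel_left _ (by omega)]
          rw [hdiv]
          have htC : t < C := (ft t).mpr (by rw [← hc]; exact_mod_cast huN)
          by_cases hun : (u : Int) + key < (N : Int)
          · rw [if_pos hun]
            have ht1C : t + 1 < C := (ft (t + 1)).mpr (by push_cast; rw [mul_add, mul_one, ← hc]; omega)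
            have h2 : 2 ≤ chars.length := by omega
            rw [if_pos h2, PySem.List.slice_from _ (by omega), PySem.List.slice_to _ (by omega)]
            have : ((1 : Int)).toNat = 1 := rfl
            rw [this, PySem.List.pyGetD_natCast,
              List.getD_eq_getElem _ _ (by simp [hlen]; omega),
              List.getElem_append_left (by simp [hlen]; omega),
              List.getElem_drop]
            have : chars[1 + t]'(by omega) = PySem.List.pyGetD chars (↑(1 + t)) ' ' := by
              rw [PySem.List.pyGetD_natCast, List.getD_eq_getElem _ _ (by omega)]
            rw [this, hcharget (1 + t) (by omega)]
            congr 1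
            push_cast
            rw [hc]
            ring
          · rw [if_neg hun]
            have ht1C : ¬ (t + 1 < C) := by
              intro hlt
              have := (ft (t + 1)).mp hlt
              push_cast at this
              rw [mul_add, mul_one, ← hc] at this
              omega
            have htC1 : t = C - 1 := by omega
            by_cases h2 : 2 ≤ chars.length
            · rw [if_pos h2, PySem.List.slice_from _ (by omega), PySem.List.slice_to _ (by omega)]
              have e1 : ((1 : Int)).toNat = 1 := rfl
              rw [e1, PySem.List.pyGetD_natCast]
              have h0C : 0 < C := by omega
              have hch0 := hcharget 0 h0C
              cases hcl : chars with
              | nil =>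
                  rw [hcl] at hlen
                  simp at hlen
                  omega
              | cons ch0 rest =>
                  have hrest : rest.length = C - 1 := by
                    rw [hcl] at hlen
                    simp at hlen
                    omega
                  simp only [List.drop_succ_cons, List.drop_zero, List.take_succ_cons,
                    List.take_zero]
                  rw [List.getD_append_right _ _ _ _ (by omega)]
                  have hz : t - rest.length = 0 := by omega
                  rw [hz]
                  simp only [List.getD_cons_zero]
                  rw [hcl] at hch0
                  simp only [PySem.List.pyGetD_natCast, List.getD_cons_zero] at hch0
                  simp only [Nat.cast_zero, mul_zero] at hch0
                  exact hch0.symm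
            · rw [if_neg h2]
              have ht0 : t = 0 := by omega
              subst ht0
              rw [hcharget 0 htC]
              simp
        · rw [if_neg hchain, if_neg hchain]

-- ===== VERDICT (by name: the statement is the Claim_ definition above) =====
theorem transposition_cipher_spec : Claim_equal_transposition_cipher := by
  intro text key _ hpre
  unfold Spec_transposition_cipher
  exact pv_main text key hpre
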